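-- pv_equiv track=rewrite | github.com/tcoyvwac/ClickHouse | tests/ci/docker_server.py | gen_tags
-- ===== SOURCE A (Python) =====
-- from typing import List, Tuple
--
-- def gen_tags(version: str, release_type: str) -> List[str]:
--     """
--     22.2.2.2 + latest:
--     - latest
--     - 22
--     - 22.2
--     - 22.2.2
--     - 22.2.2.2
--     22.2.2.2 + major:
--     - 22
--     - 22.2
--     - 22.2.2
--     - 22.2.2.2
--     22.2.2.2 + minor:
--     - 22.2
--     - 22.2.2
--     - 22.2.2.2
--     22.2.2.2 + patch:
--     - 22.2.2
--     - 22.2.2.2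
--     22.2.2.2 + head:
--     - head
--     """
--     parts = version.split(".")
--     tags = []
--     if release_type == "latest":
--         tags.append(release_type)
--         for i in range(len(parts)):
--             tags.append(".".join(parts[: i + 1]))
--     elif release_type == "major":
--         for i in range(len(parts)):
--             tags.append(".".join(parts[: i + 1]))
--     elif release_type == "minor":
--         for i in range(1, len(parts)):
--             tags.append(".".join(parts[: i + 1]))
--     elif release_type == "patch":
--         for i in range(2, len(parts)):
--             tags.append(".".join(parts[: i + 1]))
--     elif release_type == "head":
--         tags.append(release_type)
--     else:
--         raise ValueError(f"{release_type} is not valid release part")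
--     return tags
-- ===== SOURCE B (Python) =====
-- def gen_tags(version, release_type):
--     if release_type == "head":
--         return ["head"]
--     if release_type == "latest":
--         start, tags = 0, ["latest"]
--     elif release_type in ("major", "minor", "patch"):
--         start = ("major", "minor", "patch").index(release_type)
--         tags = []
--     else:
--         raise ValueError(f"{release_type} is not valid release part")
--     acc = ""
--     dots = 0
--     for ch in version:
--         if ch == ".":
--             if dots >= start:
--                 tags.append(acc)
--             dots += 1
--         acc += ch
--     if dots >= start:
--         tags.append(acc)
--     return tags
-- ===== Notes on version B (the rewrite author's own statement) =====
-- stated objective: alternative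
-- what changed: B never builds the parts list: it makes a single character-level pass over the version string, maintaining the growing prefix and a dot counter, emitting a tag at each dot (and at the end) once enough dots have been seen, instead of A's split + per-branch join-over-slices loops.
import Mathlib
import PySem

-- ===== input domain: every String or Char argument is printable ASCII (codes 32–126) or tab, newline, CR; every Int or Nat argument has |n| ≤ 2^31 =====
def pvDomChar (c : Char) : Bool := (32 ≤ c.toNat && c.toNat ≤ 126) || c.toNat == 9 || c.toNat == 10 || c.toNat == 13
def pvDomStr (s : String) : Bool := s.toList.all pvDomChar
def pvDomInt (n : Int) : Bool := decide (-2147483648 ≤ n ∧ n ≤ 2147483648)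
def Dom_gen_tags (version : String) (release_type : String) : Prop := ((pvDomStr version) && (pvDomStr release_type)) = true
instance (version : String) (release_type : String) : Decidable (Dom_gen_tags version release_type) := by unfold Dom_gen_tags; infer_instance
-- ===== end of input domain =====

-- B makes one character-level pass over version (prefix accumulator + dot counter), never building the parts list; objective: alternative.

-- ===== PORT A =====
def gen_tags (version : String) (release_type : String) : List String :=
  -- version.split(".") / ".".join(…) ported exactly via PySem.Chars.splitOn / PySem.Chars.join on code points
  let parts := PySem.Chars.splitOn version.toList ['.']
  let tags : List String := []
  if release_type == "latest" then
    (PySem.List.pyRange 0 parts.length 1).foldl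
      (fun acc i => acc ++ [String.ofList (PySem.Chars.join ['.'] (PySem.List.slice parts none (some (i + 1))))])
      (tags ++ [release_type])
  else if release_type == "major" then
    (PySem.List.pyRange 0 parts.length 1).foldl
      (fun acc i => acc ++ [String.ofList (PySem.Chars.join ['.'] (PySem.List.slice parts none (some (i + 1))))]) tags
  else if release_type == "minor" then
    (PySem.List.pyRange 1 parts.length 1).foldl
      (fun acc i => acc ++ [String.ofList (PySem.Chars.join ['.'] (PySem.List.slice parts none (some (i + 1))))]) tags
  else if release_type == "patch" then
    (PySem.List.pyRange 2 parts.length 1).foldl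
      (fun acc i => acc ++ [String.ofList (PySem.Chars.join ['.'] (PySem.List.slice parts none (some (i + 1))))]) tags
  else if release_type == "head" then
    tags ++ [release_type]
  else
    []  -- Python raises ValueError here; excluded by Pre_gen_tags

-- ===== PORT B =====
-- the loop body of Source B's single for-loop over the characters of version
def tagStep (start : Int) (s : List String × List Char × Int) (ch : Char) : List String × List Char × Int :=
  if ch = '.' then
    ((if start ≤ s.2.2 then s.1 ++ [String.ofList s.2.1] else s.1), s.2.1 ++ [ch], s.2.2 + 1)
  else (s.1, s.2.1 ++ [ch], s.2.2)

def gen_tags_alt (version : String) (release_type : String) : List String :=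
  if release_type == "head" then ["head"]
  else
    let st? : Option (Int × List String) :=
      if release_type == "latest" then some (0, ["latest"])
      else if ["major", "minor", "patch"].contains release_type then
        (PySem.List.index? ["major", "minor", "patch"] release_type).map
          (fun k => ((k : Int), ([] : List String)))
      else none
    match st? with
    | none => []  -- Python raises ValueError here; excluded by Pre_gen_tags
    | some (start, tags0) =>
      let s := version.toList.foldl (tagStep start) (tags0, ([] : List Char), (0 : Int))
      if start ≤ s.2.2 then s.1 ++ [String.ofList s.2.1] else s.1

-- ===== PRECONDITION & SPEC =====
-- Pre_ excludes exactly the inputs on which A raises ValueError (unknown release_type).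
def Pre_gen_tags (version : String) (release_type : String) : Prop :=
  release_type = "latest" ∨ release_type = "major" ∨ release_type = "minor" ∨
  release_type = "patch" ∨ release_type = "head"
instance (version : String) (release_type : String) : Decidable (Pre_gen_tags version release_type) := by
  unfold Pre_gen_tags; infer_instance
def pvWitness_gen_tags : String × String := ("22.2.2.2", "minor")

def Spec_gen_tags (version : String) (release_type : String) (out : List String) : Prop := out = gen_tags_alt version release_type
instance (version : String) (release_type : String) (out : List String) : Decidable (Spec_gen_tags version release_type out) := by unfold Spec_gen_tags; infer_instance

-- ===== CLAIM (what is proved, stated in full; the proofs are below) =====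
def Claim_equal_gen_tags : Prop := ∀ (version : String) (release_type : String), Dom_gen_tags version release_type → Pre_gen_tags version release_type → Spec_gen_tags version release_type (gen_tags version release_type)

-- ===== LEMMAS AND PROOFS =====

-- structural single-character split: what version.split(".") computes, as a plain recursion
def mySplit : List Char → List (List Char)
  | [] => [[]]
  | c :: rest => if c = '.' then [] :: mySplit rest else (mySplit rest).modifyHead (c :: ·)

lemma mySplit_ne_nil (cs : List Char) : mySplit cs ≠ [] := by
  induction cs with
  | nil => simp [mySplit]
  | cons c rest ih =>
    simp only [mySplit]
    split_ifs
    · simp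
    · cases h : mySplit rest with
      | nil => exact absurd h ih
      | cons p ps => simp [h, List.modifyHead]

def consHead (pre : List Char) : List (List Char) → List (List Char)
  | [] => [pre]
  | p :: ps => (pre ++ p) :: ps

lemma splitOn_go_single (fuel : Nat) : ∀ (l cur : List Char) (acc : List (List Char)),
    l.length ≤ fuel →
    PySem.Chars.splitOn.go ['.'] fuel l cur acc = acc.reverse ++ consHead cur.reverse (mySplit l) := by
  induction fuel with
  | zero =>
    intro l cur acc h
    have : l = [] := List.length_eq_zero_iff.mp (Nat.le_zero.mp h)
    subst this
    simp [PySem.Chars.splitOn.go, mySplit, consHead]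
  | succ fuel ih =>
    intro l cur acc h
    cases l with
    | nil => simp [PySem.Chars.splitOn.go, mySplit, consHead]
    | cons c rest =>
      rw [PySem.Chars.splitOn.go]
      by_cases hc : c = '.'
      · subst hc
        have hp : List.isPrefixOf ['.'] ('.' :: rest) = true := by simp [List.isPrefixOf]
        rw [if_pos hp]
        simp only [List.length_cons] at h
        rw [ih _ _ _ (by simpa using Nat.le_of_succ_le_succ h)]
        simp [mySplit, consHead]
        cases hms : mySplit rest with
        | nil => exact absurd hms (mySplit_ne_nil rest)
        | cons p ps => simp [consHead]
      · have hp : List.isPrefixOf ['.'] (c :: rest) = false := by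
          simp [List.isPrefixOf]; exact fun hcc => absurd hcc.symm hc
        rw [if_neg (by simp [hp])]
        simp only [List.length_cons] at h
        rw [ih _ _ _ (Nat.le_of_succ_le_succ h)]
        simp only [mySplit, if_neg hc]
        cases hms : mySplit rest with
        | nil => exact absurd hms (mySplit_ne_nil rest)
        | cons p ps => simp [consHead, List.modifyHead]

lemma splitOn_single (cs : List Char) : PySem.Chars.splitOn cs ['.'] = mySplit cs := by
  rw [PySem.Chars.splitOn, splitOn_go_single (cs.length + 1) cs [] [] (Nat.le_succ _)]
  cases h : mySplit cs with
  | nil => exact absurd h (mySplit_ne_nil cs)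
  | cons p ps => simp [consHead]

-- reference emission: walk the parts, carrying the joined prefix, emitting once enough dots were seen
def ref (start : Int) : Int → List Char → List (List Char) → List String
  | _, _, [] => []
  | dots, pre, p :: ps =>
    (if start ≤ dots then [String.ofList (pre ++ p)] else []) ++
      ref start (dots + 1) (pre ++ p ++ ['.']) ps

lemma foldB (start : Int) : ∀ (cs : List Char) (tags : List String) (acc : List Char) (dots : Int),
    (if start ≤ (cs.foldl (tagStep start) (tags, acc, dots)).2.2 then
        (cs.foldl (tagStep start) (tags, acc, dots)).1 ++
          [String.ofList (cs.foldl (tagStep start) (tags, acc, dots)).2.1]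
      else (cs.foldl (tagStep start) (tags, acc, dots)).1)
      = tags ++ ref start dots acc (mySplit cs) := by
  intro cs
  induction cs with
  | nil =>
    intro tags acc dots
    simp only [List.foldl_nil, mySplit, ref]
    split_ifs <;> simp
  | cons c rest ih =>
    intro tags acc dots
    rw [List.foldl_cons]
    by_cases hc : c = '.'
    · subst hc
      have hstep : tagStep start (tags, acc, dots) '.' =
          ((if start ≤ dots then tags ++ [String.ofList acc] else tags), acc ++ ['.'], dots + 1) := by
        simp [tagStep]
      rw [hstep, ih]
      simp only [mySplit, if_pos rfl]
      by_cases hsd : start ≤ dots <;> simp [ref, hsd, List.append_assoc]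
    · simp only [tagStep, if_neg hc]
      rw [ih]
      simp only [mySplit, if_neg hc]
      cases hms : mySplit rest with
      | nil => exact absurd hms (mySplit_ne_nil rest)
      | cons p ps => simp [List.modifyHead, ref, List.append_assoc]

lemma ref_prefix (start : Int) : ∀ (parts : List (List Char)) (pre : List Char) (dots : Int),
    ref start dots pre parts =
      ((List.range parts.length).drop (start - dots).toNat).map
        (fun i => String.ofList (pre ++ PySem.Chars.join ['.'] (parts.take (i + 1)))) := by
  intro parts
  induction parts with
  | nil => intro pre dots; simp [ref]
  | cons p ps ih =>
    intro pre dots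
    simp only [ref, ih, List.length_cons, List.range_succ_eq_map]
    have hjoin : ∀ i ∈ List.range ps.length,
        String.ofList ((pre ++ p ++ ['.']) ++ PySem.Chars.join ['.'] (ps.take (i + 1)))
          = String.ofList (pre ++ PySem.Chars.join ['.'] ((p :: ps).take (i + 1 + 1))) := by
      intro i hi
      rw [List.mem_range] at hi
      have htk : ps.take (i + 1) ≠ [] := by
        cases ps with
        | nil => simp at hi
        | cons q qs => simp
      cases hq : ps.take (i + 1) with
      | nil => exact absurd hq htk
      | cons q qs =>
        simp only [List.take_succ_cons, hq, PySem.Chars.join_cons_cons]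
        simp [List.append_assoc]
    by_cases hk : start ≤ dots
    · have h1 : (start - dots).toNat = 0 := by omega
      have h2 : (start - (dots + 1)).toNat = 0 := by omega
      rw [h1, h2, if_pos hk]
      simp only [List.drop_zero, List.map_cons, List.map_map, List.singleton_append]
      congr 1
      · simp [PySem.Chars.join_singleton]
      · exact List.map_congr_left fun i hi => by simpa using hjoin i hi
    · have h1 : ∃ k : Nat, (start - dots).toNat = k + 1 := ⟨(start - (dots + 1)).toNat, by omega⟩
      obtain ⟨k, hk1⟩ := h1
      have h2 : (start - (dots + 1)).toNat = k := by omega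
      rw [hk1, h2, if_neg hk, List.nil_append, List.drop_succ_cons, ← List.map_drop,
        List.map_map]
      exact List.map_congr_left fun i hi => by
        simpa using hjoin i (List.mem_of_mem_drop hi)

-- the suffix of the full index range starting at a is the range starting at a
lemma map_pyRange_drop {α : Type} (f : Int → α) (a : Int) (n : Nat) (ha : 0 ≤ a) :
    ((PySem.List.pyRange 0 (n : Int) 1).map f).drop a.toNat = (PySem.List.pyRange a (n : Int) 1).map f := by
  by_cases h : a ≤ (n : Int)
  · rw [PySem.List.pyRange_one_append 0 a (n : Int) ha h, List.map_append,
      List.drop_append_of_le_length (by simp [PySem.List.length_pyRange_one])]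
    simp [PySem.List.length_pyRange_one]
  · rw [PySem.List.pyRange_one_eq_nil (le_of_lt (not_le.mp h)), List.map_nil,
      List.drop_eq_nil_of_le (by simp [PySem.List.length_pyRange_one]; omega)]

-- A's per-branch loop over range(k, len(parts)) as a dropped map over the full index range
lemma A_branch (parts : List (List Char)) (k : Nat) :
    (PySem.List.pyRange (k : Int) (parts.length : Int) 1).map
        (fun i => String.ofList (PySem.Chars.join ['.'] (PySem.List.slice parts none (some (i + 1)))))
      = ((List.range parts.length).drop k).map
          (fun i => String.ofList (PySem.Chars.join ['.'] (parts.take (i + 1)))) := by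
  rw [← map_pyRange_drop _ (k : Int) parts.length (by positivity), Int.toNat_natCast,
    PySem.List.pyRange_zero_natCast, List.map_map, ← List.map_drop]
  refine List.map_congr_left fun i _ => ?_
  have h1 : ((i : Int) + 1) = ((i + 1 : Nat) : Int) := by push_cast; ring
  simp only [Function.comp_apply]
  rw [h1, PySem.List.slice_to_natCast]

-- both sides reduced to the same dropped map, for a branch with start index k and initial tags t0
lemma branch_eq (cs : List Char) (k : Nat) (t0 : List String) :
    t0 ++ (PySem.List.pyRange (k : Int) ((PySem.Chars.splitOn cs ['.']).length : Int) 1).map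
        (fun i => String.ofList (PySem.Chars.join ['.']
          (PySem.List.slice (PySem.Chars.splitOn cs ['.']) none (some (i + 1)))))
      = (if (k : Int) ≤ (cs.foldl (tagStep (k : Int)) (t0, ([] : List Char), (0 : Int))).2.2 then
          (cs.foldl (tagStep (k : Int)) (t0, ([] : List Char), (0 : Int))).1 ++
            [String.ofList (cs.foldl (tagStep (k : Int)) (t0, ([] : List Char), (0 : Int))).2.1]
        else (cs.foldl (tagStep (k : Int)) (t0, ([] : List Char), (0 : Int))).1) := by
  rw [foldB, ref_prefix, A_branch, splitOn_single]
  simp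

-- ===== VERDICT (by name: the statement is the Claim_ definition above) =====
theorem gen_tags_spec : Claim_equal_gen_tags := by
  intro version release_type _ hpre
  unfold Spec_gen_tags gen_tags gen_tags_alt
  rcases hpre with h | h | h | h | h <;> subst h
  · -- latest
    rw [if_pos (by decide), if_neg (by decide), PySem.List.foldl_append_singleton_eq_map]
    simpa using branch_eq version.toList 0 ["latest"]
  · -- major
    rw [if_neg (by decide), if_pos (by decide), if_neg (by decide), if_neg (by decide),
      if_pos (by decide), PySem.List.foldl_append_singleton_eq_map]
    simpa using branch_eq version.toList 0 []
  · -- minor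
    rw [if_neg (by decide), if_neg (by decide), if_pos (by decide), if_neg (by decide),
      if_neg (by decide), if_pos (by decide), PySem.List.foldl_append_singleton_eq_map]
    simpa using branch_eq version.toList 1 []
  · -- patch
    rw [if_neg (by decide), if_neg (by decide), if_neg (by decide), if_pos (by decide),
      if_neg (by decide), if_neg (by decide), if_pos (by decide),
      PySem.List.foldl_append_singleton_eq_map]
    simpa using branch_eq version.toList 2 []
  · -- head
    rw [if_neg (by decide), if_neg (by decide), if_neg (by decide), if_neg (by decide),
      if_pos (by decide), if_pos (by decide)]
    simp
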